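-- pv_equiv track=rewrite | github.com/churilov-ns/taskdisttools | taskdisttools/utils/timetable.py | model_launches
-- ===== SOURCE A (Python) =====
-- def model_launches(t0, f, s, t_max):
--     """
--     Моделирование запусков задачи
--     :param t0: время первого запуска
--     :param f: частота запусков
--     :param s: продолжительность работы
--     :param t_max: максимальная эпоха моделирования
--     :return: генератор эпох, на которые приходтся активность задачи
--     """
--     t = t0
--     while t < t_max:
--         yield t
--         if t - t0 < s - 1:
--             t += 1
--         else:
--             t0 += f
--             t = t0
-- ===== SOURCE B (Python) =====
-- def model_launches(t0, f, s, t_max):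
--     """
--     Closed-form re-implementation: compute the number k of complete bursts
--     arithmetically (ceiling division), emit each complete burst as a range,
--     then emit the final (possibly truncated) burst up to t_max.
--     """
--     L = max(s - 1, 0)  # last in-burst offset
--     if f > 0:
--         # number of complete bursts: ceil((t_max - L - t0) / f), clamped at 0
--         k = max(-((t0 + L - t_max) // f), 0)
--         for i in range(k):
--             start = t0 + i * f
--             yield from range(start, start + L + 1)
--         yield from range(t0 + k * f, t_max)  # truncated final burst (or empty)
--     else:
--         # non-positive frequency: at most one burst, cut off at t_max
--         yield from range(t0, t_max)
-- ===== Notes on version B (the rewrite author's own statement) =====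
-- stated objective: alternative
-- what changed: Replaced A's step-by-step state-machine simulation (one while-loop iteration per emitted epoch with branch-driven resets) by a closed-form decomposition: the number of complete bursts is computed arithmetically by a ceiling division and the output is emitted as k full ranges plus one truncated final range.
import Mathlib
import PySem

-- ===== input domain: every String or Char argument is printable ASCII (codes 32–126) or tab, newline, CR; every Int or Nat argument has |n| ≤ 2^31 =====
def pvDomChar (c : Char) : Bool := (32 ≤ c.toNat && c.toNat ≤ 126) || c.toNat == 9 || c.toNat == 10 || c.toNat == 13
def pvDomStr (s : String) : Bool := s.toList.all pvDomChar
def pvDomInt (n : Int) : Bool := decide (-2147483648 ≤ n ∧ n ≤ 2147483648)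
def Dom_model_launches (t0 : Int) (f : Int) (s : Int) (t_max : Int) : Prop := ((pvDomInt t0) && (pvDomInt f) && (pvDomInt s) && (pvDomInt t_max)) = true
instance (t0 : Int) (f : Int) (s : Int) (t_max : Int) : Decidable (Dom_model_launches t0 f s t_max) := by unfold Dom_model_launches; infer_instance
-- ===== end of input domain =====

-- B replaces A's step-by-step state-machine loop by a closed-form decomposition
-- (ceiling-division count of complete bursts, emitted as ranges); objective: alternative.
-- ===== PORT A =====
-- A's while-loop, one iteration per step; the fuel is an upper bound on the number of
-- iterations on every input satisfying Pre_ (outside Pre_ the Python loop never terminates).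
def modelLoopA (f : Int) (s : Int) (t_max : Int) : Nat → Int → Int → List Int
  | 0, _, _ => []
  | fuel + 1, t0, t =>
    if t < t_max then
      t :: (if t - t0 < s - 1 then modelLoopA f s t_max fuel t0 (t + 1)
            else modelLoopA f s t_max fuel (t0 + f) (t0 + f))
    else []

def model_launches (t0 : Int) (f : Int) (s : Int) (t_max : Int) : List Int :=
  modelLoopA f s t_max
    ((t_max - t0).toNat * ((s - 1).toNat + 2) + (s - 1).toNat + 1) t0 t0

-- ===== PORT B =====
def model_launches_alt (t0 : Int) (f : Int) (s : Int) (t_max : Int) : List Int :=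
  let L := max (s - 1) 0
  if 0 < f then
    let k := max (-(PySem.Int.floordiv (t0 + L - t_max) f)) 0
    ((PySem.List.pyRange 0 k 1).flatMap (fun i =>
        PySem.List.pyRange (t0 + i * f) (t0 + i * f + L + 1) 1))
      ++ PySem.List.pyRange (t0 + k * f) t_max 1
  else
    PySem.List.pyRange t0 t_max 1

-- ===== PRECONDITION & SPEC =====
-- Pre_ is exactly the set of inputs on which Python A terminates: with a non-positive
-- frequency f the while-loop runs forever unless its single burst already reaches t_max.
def Pre_model_launches (t0 : Int) (f : Int) (s : Int) (t_max : Int) : Prop :=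
  1 ≤ f ∨ t_max ≤ t0 + max (s - 1) 0

instance (t0 : Int) (f : Int) (s : Int) (t_max : Int) : Decidable (Pre_model_launches t0 f s t_max) := by unfold Pre_model_launches; infer_instance

def pvWitness_model_launches : Int × Int × Int × Int := (0, 2, 3, 7)

def Spec_model_launches (t0 : Int) (f : Int) (s : Int) (t_max : Int) (out : List Int) : Prop := out = model_launches_alt t0 f s t_max
instance (t0 : Int) (f : Int) (s : Int) (t_max : Int) (out : List Int) : Decidable (Spec_model_launches t0 f s t_max out) := by unfold Spec_model_launches; infer_instance

-- ===== CLAIM (what is proved, stated in full; the proofs are below) =====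
def Claim_equal_model_launches : Prop := ∀ (t0 : Int) (f : Int) (s : Int) (t_max : Int), Dom_model_launches t0 f s t_max → Pre_model_launches t0 f s t_max → Spec_model_launches t0 f s t_max (model_launches t0 f s t_max)

-- ===== LEMMAS AND PROOFS =====

-- Reference shape: the sequence of bursts, one recursion step per complete burst.
def gB (f : Int) (s : Int) (t_max : Int) (t0 : Int) : List Int :=
  if _h : t0 + max (s - 1) 0 < t_max ∧ 1 ≤ f then
    PySem.List.pyRange t0 (t0 + max (s - 1) 0 + 1) 1 ++ gB f s t_max (t0 + f)
  else
    PySem.List.pyRange t0 t_max 1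
termination_by (t_max - t0).toNat
decreasing_by omega

lemma burst_eq_gB (f s t_max u : Int) (hf : 1 ≤ f) :
    PySem.List.pyRange u (min (u + max (s - 1) 0 + 1) t_max) 1 ++
      (if u + max (s - 1) 0 < t_max then gB f s t_max (u + f) else []) = gB f s t_max u := by
  conv_rhs => rw [gB]
  by_cases h : u + max (s - 1) 0 < t_max
  · rw [if_pos h, dif_pos ⟨h, hf⟩, min_eq_left (by omega)]
  · rw [if_neg h, dif_neg (by tauto), min_eq_right (by omega), List.append_nil]

-- A's loop when the current burst already reaches t_max: it just counts up to t_max and stops.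
lemma modelLoopA_trunc (f s t_max : Int) : ∀ (fuel : Nat) (t0 t : Int),
    t_max ≤ t0 + max (s - 1) 0 → t0 ≤ t → (t_max - t).toNat < fuel →
    modelLoopA f s t_max fuel t0 t = PySem.List.pyRange t t_max 1 := by
  intro fuel
  induction fuel with
  | zero => intro t0 t _ _ hlt; omega
  | succ n ih =>
    intro t0 t hmax ht hfuel
    rw [modelLoopA]
    by_cases hlt : t < t_max
    · rw [if_pos hlt, if_pos (by omega), ih t0 (t + 1) hmax (by omega) (by omega),
        PySem.List.pyRange_one_cons hlt]
    · rw [if_neg hlt, PySem.List.pyRange_one_eq_nil (by omega)]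

-- A's loop from any point inside a burst, for positive frequency: the rest of the current
-- (possibly truncated) burst, then — if the burst completes — the remaining bursts gB.
lemma modelLoopA_main (f s t_max : Int) (hf : 1 ≤ f) : ∀ (fuel : Nat) (t0 t : Int),
    t0 ≤ t → t ≤ t0 + max (s - 1) 0 →
    (t_max - t0).toNat * ((s - 1).toNat + 2) + (t0 + max (s - 1) 0 - t).toNat + 1 ≤ fuel →
    modelLoopA f s t_max fuel t0 t =
      PySem.List.pyRange t (min (t0 + max (s - 1) 0 + 1) t_max) 1 ++
        (if t0 + max (s - 1) 0 < t_max then gB f s t_max (t0 + f) else []) := by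
  intro fuel
  induction fuel with
  | zero => intro t0 t _ _ hfuel; omega
  | succ n ih =>
    intro t0 t ht0 htL hfuel
    rw [modelLoopA]
    by_cases hlt : t < t_max
    · rw [if_pos hlt]
      by_cases hbr : t - t0 < s - 1
      · rw [if_pos hbr, ih t0 (t + 1) (by omega) (by omega) (by omega)]
        conv_rhs => rw [PySem.List.pyRange_one_cons
          (show t < min (t0 + max (s - 1) 0 + 1) t_max by omega), List.cons_append]
      · -- end of the burst: t = t0 + max (s-1) 0 and the loop jumps to base t0 + f
        have hteq : t = t0 + max (s - 1) 0 := by omega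
        rw [if_neg hbr]
        have hnext : modelLoopA f s t_max n (t0 + f) (t0 + f) =
            PySem.List.pyRange (t0 + f) (min (t0 + f + max (s - 1) 0 + 1) t_max) 1 ++
              (if t0 + f + max (s - 1) 0 < t_max then gB f s t_max (t0 + f + f) else []) := by
          apply ih (t0 + f) (t0 + f) le_rfl (by omega)
          have h1 : (t_max - (t0 + f)).toNat ≤ (t_max - t0).toNat - 1 := by omega
          have h2 : (t_max - (t0 + f)).toNat * ((s - 1).toNat + 2) ≤
              ((t_max - t0).toNat - 1) * ((s - 1).toNat + 2) :=
            Nat.mul_le_mul_right _ h1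
          have h3 : ((t_max - t0).toNat - 1) * ((s - 1).toNat + 2) =
              (t_max - t0).toNat * ((s - 1).toNat + 2) - ((s - 1).toNat + 2) :=
            Nat.sub_one_mul _ _
          have h4 : ((s - 1).toNat + 2) ≤ (t_max - t0).toNat * ((s - 1).toNat + 2) :=
            Nat.le_mul_of_pos_left _ (by omega)
          omega
        rw [hnext, burst_eq_gB f s t_max (t0 + f) hf]
        have hcomp : t0 + max (s - 1) 0 < t_max := by omega
        rw [if_pos hcomp, min_eq_left (by omega), hteq,
          PySem.List.pyRange_one_singleton, List.singleton_append]
    · rw [if_neg hlt, PySem.List.pyRange_one_eq_nil (by omega),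
        if_neg (show ¬ t0 + max (s - 1) 0 < t_max by omega), List.append_nil]

-- B's closed form equals gB for positive frequency.
lemma alt_eq_gB (f s t_max : Int) (hf : 1 ≤ f) : ∀ (n : Nat) (t0 : Int), (t_max - t0).toNat = n →
    ((PySem.List.pyRange 0 (max (-(PySem.Int.floordiv (t0 + max (s - 1) 0 - t_max) f)) 0) 1).flatMap
        (fun i => PySem.List.pyRange (t0 + i * f) (t0 + i * f + max (s - 1) 0 + 1) 1))
      ++ PySem.List.pyRange
          (t0 + (max (-(PySem.Int.floordiv (t0 + max (s - 1) 0 - t_max) f)) 0) * f) t_max 1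
      = gB f s t_max t0 := by
  intro n
  induction n using Nat.strong_induction_on with
  | _ n ih =>
    intro t0 hn
    rw [PySem.Int.floordiv_eq_ediv_of_pos (by omega)]
    by_cases hful : t0 + max (s - 1) 0 < t_max
    · -- at least one complete burst
      have hqneg : (t0 + max (s - 1) 0 - t_max) / f < 0 :=
        Int.ediv_neg_of_neg_of_pos (by omega) (by omega)
      have hmaxq : max (-((t0 + max (s - 1) 0 - t_max) / f)) 0 =
          -((t0 + max (s - 1) 0 - t_max) / f) := by omega
      rw [hmaxq]
      set q : Int := -((t0 + max (s - 1) 0 - t_max) / f) with hq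
      have hq1 : 1 ≤ q := by omega
      -- the next base has exactly one complete burst fewer
      have hstep : (t0 + f + max (s - 1) 0 - t_max) / f = (t0 + max (s - 1) 0 - t_max) / f + 1 := by
        have := Int.add_mul_ediv_right (t0 + max (s - 1) 0 - t_max) 1 (show f ≠ 0 by omega)
        have harg : t0 + f + max (s - 1) 0 - t_max = t0 + max (s - 1) 0 - t_max + 1 * f := by ring
        rw [harg, this]
      have hih := ih (t_max - (t0 + f)).toNat (by omega) (t0 + f) rfl
      rw [PySem.Int.floordiv_eq_ediv_of_pos (by omega), hstep] at hih
      have hmaxq' : max (-((t0 + max (s - 1) 0 - t_max) / f + 1)) 0 = q - 1 := by omega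
      rw [hmaxq'] at hih
      rw [PySem.List.pyRange_one_cons (show (0:Int) < q by omega), List.flatMap_cons]
      have hshift : (PySem.List.pyRange 1 q 1).flatMap
            (fun i => PySem.List.pyRange (t0 + i * f) (t0 + i * f + max (s - 1) 0 + 1) 1) =
          (PySem.List.pyRange 0 (q - 1) 1).flatMap
            (fun i => PySem.List.pyRange (t0 + f + i * f) (t0 + f + i * f + max (s - 1) 0 + 1) 1) := by
        rw [PySem.List.pyRange_one 1 q, PySem.List.pyRange_one 0 (q - 1), List.flatMap_map,
          List.flatMap_map, sub_zero]
        apply List.flatMap_congr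
        intro k _
        rw [show t0 + (1 + (k : Int)) * f = t0 + f + (0 + (k : Int)) * f by ring]
      simp only [zero_add, zero_mul, add_zero] at hshift ⊢
      rw [hshift, show t0 + q * f = t0 + f + (q - 1) * f by ring, List.append_assoc, hih]
      conv_rhs => rw [gB]
      rw [dif_pos ⟨hful, hf⟩]
    · -- no complete burst: k = 0 and only the truncated final range remains
      have hqpos : 0 ≤ (t0 + max (s - 1) 0 - t_max) / f :=
        Int.ediv_nonneg (by omega) (by omega)
      have hmax0 : max (-((t0 + max (s - 1) 0 - t_max) / f)) 0 = 0 := by omega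
      rw [hmax0, zero_mul, add_zero, PySem.List.pyRange_one_eq_nil (le_refl (0:Int)),
        List.flatMap_nil, List.nil_append, gB, dif_neg (by tauto)]

-- ===== VERDICT (by name: the statement is the Claim_ definition above) =====
theorem model_launches_spec : Claim_equal_model_launches := by
  intro t0 f s t_max _hdom hpre
  unfold Spec_model_launches model_launches model_launches_alt
  by_cases hf : 1 ≤ f
  · -- positive frequency: both sides equal gB
    rw [if_pos (show (0:Int) < f by omega)]
    have hA := modelLoopA_main f s t_max hf
      ((t_max - t0).toNat * ((s - 1).toNat + 2) + (s - 1).toNat + 1) t0 t0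
      le_rfl (by omega) (by omega)
    rw [hA, burst_eq_gB f s t_max t0 hf]
    exact (alt_eq_gB f s t_max hf (t_max - t0).toNat t0 rfl).symm
  · -- non-positive frequency: Pre_ forces the single burst to reach t_max
    have hmax : t_max ≤ t0 + max (s - 1) 0 := by
      rcases hpre with h | h
      · omega
      · exact h
    rw [if_neg (show ¬ (0:Int) < f by omega)]
    apply modelLoopA_trunc f s t_max _ t0 t0 hmax le_rfl
    have h4 : (t_max - t0).toNat ≤ (t_max - t0).toNat * ((s - 1).toNat + 2) :=
      Nat.le_mul_of_pos_right _ (by omega)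
    omega
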